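-- pv_equiv track=rewrite | github.com/jeno8522/Coding-Test-Study | 2023(싸피 코테스터디)/10월/2.py | findMaximumGreatness
-- ===== SOURCE A (Python) =====
-- def binary_search(arr, num):
--     l, r = 0, len(arr) - 1
--     index = -1
--     while l <= r:
--         m = (l + r) // 2
--         if arr[m] > num:
--             index = m
--             r = m - 1
--         else:
--             l = m + 1
--     return index
--
-- def findMaximumGreatness(arr):
--     sorted_arr = sorted(arr)
--     rearranged_arr = []
--
--     for num in arr:
--         index = binary_search(sorted_arr, num)
--
--         if index != -1:
--             rearranged_arr.append(sorted_arr.pop(index))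
--         else:
--             rearranged_arr.append(sorted_arr.pop(0))
--
--     cnt = 0
--     for i in range(len(arr)):
--         if arr[i] < rearranged_arr[i]:
--             cnt += 1
--     return cnt
-- ===== SOURCE B (Python) =====
-- def findMaximumGreatness(arr):
--     # Max number of positions beatable by a permutation of arr equals
--     # len(arr) minus the largest multiplicity of any value (Hall-type argument):
--     # one counting pass, no sort and no simulation.
--     if not arr:
--         return 0
--     counts = {}
--     for x in arr:
--         counts[x] = counts.get(x, 0) + 1
--     return len(arr) - max(counts.values())
-- ===== Notes on version B (the rewrite author's own statement) =====
-- stated objective: faster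
-- what changed: Replaces the sort + per-element binary-search + list.pop simulation with a single frequency-counting pass returning len(arr) minus the maximum multiplicity, which a matching/deficiency argument shows equals the simulated count.
import Mathlib
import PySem

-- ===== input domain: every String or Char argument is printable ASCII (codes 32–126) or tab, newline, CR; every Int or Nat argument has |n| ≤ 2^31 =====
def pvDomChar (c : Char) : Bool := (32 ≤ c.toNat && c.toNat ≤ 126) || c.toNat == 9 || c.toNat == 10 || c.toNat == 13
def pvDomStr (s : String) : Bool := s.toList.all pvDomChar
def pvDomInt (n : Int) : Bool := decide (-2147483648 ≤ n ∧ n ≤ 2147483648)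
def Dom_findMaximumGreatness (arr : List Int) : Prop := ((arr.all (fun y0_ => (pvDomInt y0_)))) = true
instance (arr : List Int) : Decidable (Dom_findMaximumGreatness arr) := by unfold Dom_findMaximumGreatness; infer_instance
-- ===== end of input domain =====

-- B replaces A's sort + per-element binary-search + pop simulation by a single
-- counting pass returning len(arr) - (maximum multiplicity); asymptotically faster.

-- ===== PORT A =====
-- the while-loop of binary_search, state (l, r, index)
def bsLoop (arr : List Int) (num : Int) (l r index : Int) : Int :=
  if _h : l ≤ r then
    let m := PySem.Int.floordiv (l + r) 2
    -- arr[m]: provably in range at every call A makes (0 ≤ l ≤ m ≤ r < len arr)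
    if PySem.List.pyGetD arr m 0 > num then
      bsLoop arr num l (m - 1) m
    else
      bsLoop arr num (m + 1) r index
  else index
termination_by (r - l + 1).toNat
decreasing_by
  · have hb := PySem.Int.floordiv_two_mid_bounds (lo := l) (hi := r) _h
    omega
  · have hb := PySem.Int.floordiv_two_mid_bounds (lo := l) (hi := r) _h
    omega

def binary_search (arr : List Int) (num : Int) : Int :=
  bsLoop arr num 0 (PySem.List.len arr - 1) (-1)

-- one iteration of A's main loop; state = (sorted_arr, rearranged_arr)
def fmgStep (st : List Int × List Int) (num : Int) : List Int × List Int :=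
  let index := binary_search st.1 num
  if index ≠ -1 then
    match PySem.List.pop? st.1 index with
    | some r => (r.2, st.2 ++ [r.1])
    | none => (st.1, st.2)   -- unreachable: Python would raise IndexError
  else
    match PySem.List.pop? st.1 0 with
    | some r => (r.2, st.2 ++ [r.1])
    | none => (st.1, st.2)   -- unreachable: Python would raise IndexError

def findMaximumGreatness (arr : List Int) : Int :=
  let sorted_arr := PySem.List.sorted arr (fun x => x) false
  let st := arr.foldl fmgStep (sorted_arr, [])
  (PySem.List.pyRange 0 (PySem.List.len arr) 1).foldl
    (fun cnt i =>
      if PySem.List.pyGetD arr i 0 < PySem.List.pyGetD st.2 i 0 then cnt + 1 else cnt) 0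

-- ===== PORT B =====
def findMaximumGreatness_alt (arr : List Int) : Int :=
  if arr = [] then 0
  else
    let counts := arr.foldl (fun (d : PySem.Dict Int Int) x => d.insert x (d.getD x 0 + 1))
      PySem.Dict.empty
    PySem.List.len arr - ((PySem.List.max? counts.values (fun v => v)).getD 0)

-- ===== PRECONDITION & SPEC =====
def Spec_findMaximumGreatness (arr : List Int) (out : Int) : Prop := out = findMaximumGreatness_alt arr
instance (arr : List Int) (out : Int) : Decidable (Spec_findMaximumGreatness arr out) := by unfold Spec_findMaximumGreatness; infer_instance

-- ===== CLAIM (what is proved, stated in full; the proofs are below) =====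
def Claim_equal_findMaximumGreatness : Prop := ∀ (arr : List Int), Dom_findMaximumGreatness arr → Spec_findMaximumGreatness arr (findMaximumGreatness arr)

-- ===== LEMMAS AND PROOFS =====

-- number of elements ≥ t / > t, as integers
def cntGe (l : List Int) (t : Int) : Int := (l.countP (fun p => decide (t ≤ p)) : Int)
def cntGt (l : List Int) (t : Int) : Int := (l.countP (fun p => decide (t < p)) : Int)
-- deficiency of threshold t: elements of P still to beat, minus available beaters in S
def fD (P S : List Int) (t : Int) : Int := cntGe P t - cntGt S t
-- maximum deficiency over the ground set G (and 0)
def Dmax (G P S : List Int) : Int := G.foldl (fun a t => max a (fD P S t)) 0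

-- abstract form of A's main loop: the number of successful "pop a strictly
-- greater element" steps, processing P against the sorted pool S
def sim : List Int → List Int → Int
  | [], _ => 0
  | x :: P, S =>
    match S.findIdx? (fun v => decide (x < v)) with
    | some i => 1 + sim P (S.eraseIdx i)
    | none => sim P (S.eraseIdx 0)

-- the list of values A's loop pops (= rearranged_arr)
def outs : List Int → List Int → List Int
  | [], _ => []
  | x :: P, S =>
    match S.findIdx? (fun v => decide (x < v)) with
    | some i => S.getD i 0 :: outs P (S.eraseIdx i)
    | none => S.getD 0 0 :: outs P (S.eraseIdx 0)

lemma cntGt_nonneg (l : List Int) (t : Int) : 0 ≤ cntGt l t := by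
  unfold cntGt; positivity

lemma cntGe_le_length (l : List Int) (t : Int) : cntGe l t ≤ (l.length : Int) := by
  unfold cntGe; exact_mod_cast List.countP_le_length ..

lemma cntGe_cons (x : Int) (P : List Int) (t : Int) :
    cntGe (x :: P) t = cntGe P t + (if t ≤ x then 1 else 0) := by
  unfold cntGe; rw [List.countP_cons]; by_cases h : t ≤ x <;> simp [h]

lemma countP_eraseIdx' (S : List Int) (p : Int → Bool) (i : Nat) (hi : i < S.length) :
    S.countP p = (S.eraseIdx i).countP p + (if p S[i] then 1 else 0) := by
  conv_lhs => rw [← List.take_append_drop i S]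
  rw [List.eraseIdx_eq_take_drop_succ, List.countP_append, List.countP_append,
    ← List.getElem_cons_drop hi, List.countP_cons]
  split_ifs <;> omega

lemma cntGt_erase (S : List Int) (i : Nat) (hi : i < S.length) (t : Int) :
    cntGt S t = cntGt (S.eraseIdx i) t + (if t < S[i] then 1 else 0) := by
  unfold cntGt; rw [countP_eraseIdx' S _ i hi]
  by_cases h : t < S[i] <;> simp [h]

lemma countP_split (l : List Int) (p q : Int → Bool) (h : ∀ a ∈ l, q a = true → p a = true) :
    l.countP p = l.countP q + l.countP (fun a => p a && !q a) := by
  induction l with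
  | nil => simp
  | cons a tl ih =>
    simp only [List.countP_cons]
    rw [ih (fun b hb => h b (List.mem_cons_of_mem a hb))]
    have ha := h a List.mem_cons_self
    cases hq : q a <;> cases hp : p a <;> simp_all <;> omega

-- with a member x < t, strictly fewer elements are ≥ t than ≥ x
lemma cntGe_step {P : List Int} {x t : Int} (hx : x ∈ P) (hxt : x < t) :
    cntGe P t + 1 ≤ cntGe P x := by
  have hsplit := countP_split P (fun p => decide (x ≤ p)) (fun p => decide (t ≤ p))
    (by intro a _ ha; simp at ha ⊢; omega)
  have hsplit' : P.countP (fun p => decide (x ≤ p)) = P.countP (fun p => decide (t ≤ p)) +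
      P.countP (fun a => decide (x ≤ a) && !decide (t ≤ a)) := hsplit
  have hpos : 0 < P.countP (fun a => decide (x ≤ a) && !decide (t ≤ a)) :=
    List.countP_pos_iff.mpr ⟨x, hx, by simp; omega⟩
  unfold cntGe; omega

-- no element of S lies in (x, v]: counts above t and above x agree for x ≤ t < v
lemma cntGt_gap {S : List Int} {x v t : Int} (hgap : ∀ w ∈ S, x < w → v ≤ w)
    (hxt : x ≤ t) (htv : t < v) : cntGt S t = cntGt S x := by
  have hsplit := countP_split S (fun p => decide (x < p)) (fun p => decide (t < p))
    (by intro a _ ha; simp at ha ⊢; omega)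
  have hsplit' : S.countP (fun p => decide (x < p)) = S.countP (fun p => decide (t < p)) +
      S.countP (fun a => decide (x < a) && !decide (t < a)) := hsplit
  have hz : S.countP (fun a => decide (x < a) && !decide (t < a)) = 0 :=
    List.countP_eq_zero.mpr (by intro a ha; have := hgap a ha; simp; intro hxa; have := this hxa; omega)
  unfold cntGt; omega

lemma cntGt_zero_of_all_le {S : List Int} {x : Int} (h : ∀ w ∈ S, ¬ x < w) :
    cntGt S x = 0 := by
  unfold cntGt
  have : S.countP (fun p => decide (x < p)) = 0 :=
    List.countP_eq_zero.mpr (by intro a ha; simpa using h a ha)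
  omega

lemma cntGt_all_of_lt_min {S : List Int} {m t : Int} (h : ∀ w ∈ S, m ≤ w) (htm : t < m) :
    cntGt S t = (S.length : Int) := by
  unfold cntGt
  have : S.countP (fun p => decide (t < p)) = S.length :=
    List.countP_eq_length.mpr (by intro a ha; have := h a ha; simp; omega)
  omega

lemma foldl_max_le (f : Int → Int) (c : Int) :
    ∀ (G : List Int) (a : Int), a ≤ c → (∀ t ∈ G, f t ≤ c) →
      G.foldl (fun b t => max b (f t)) a ≤ c := by
  intro G
  induction G with
  | nil => intro a ha _; simpa using ha
  | cons g Gt ih =>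
    intro a ha hall
    simp only [List.foldl_cons]
    exact ih _ (by have := hall g List.mem_cons_self; omega)
      (fun t ht => hall t (List.mem_cons_of_mem g ht))

lemma foldl_max_mono (f g : Int → Int) :
    ∀ (G : List Int) (a b : Int), a ≤ b → (∀ t ∈ G, f t ≤ g t) →
      G.foldl (fun x t => max x (f t)) a ≤ G.foldl (fun x t => max x (g t)) b := by
  intro G
  induction G with
  | nil => intro a b hab _; simpa using hab
  | cons h Gt ih =>
    intro a b hab hall
    simp only [List.foldl_cons]
    exact ih _ _ (by have := hall h List.mem_cons_self; omega)
      (fun t ht => hall t (List.mem_cons_of_mem h ht))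

lemma Dmax_nonneg (G P S : List Int) : 0 ≤ Dmax G P S :=
  (PySem.List.le_foldl_max_int G (fD P S) 0).1

lemma le_Dmax {G : List Int} (P S : List Int) {t : Int} (ht : t ∈ G) :
    fD P S t ≤ Dmax G P S :=
  (PySem.List.le_foldl_max_int G (fD P S) 0).2 t ht

lemma Dmax_attained (G P S : List Int) :
    Dmax G P S = 0 ∨ ∃ t ∈ G, Dmax G P S = fD P S t := by
  have hm : Dmax G P S = (G.map (fD P S)).foldl max 0 := by
    unfold Dmax; rw [List.foldl_map]
  rcases PySem.List.foldl_max_mem (G.map (fD P S)) 0 with h | h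
  · left; rw [hm, h]
  · right
    rw [hm] at *
    obtain ⟨t, ht, hval⟩ := List.mem_map.mp h
    exact ⟨t, ht, hval.symm⟩

-- sorted lists: earlier elements are ≤ later ones
lemma sorted_getElem_le {S : List Int} (hs : S.Pairwise (· ≤ ·)) {j i : Nat}
    (hji : j ≤ i) (hi : i < S.length) : S[j]'(by omega) ≤ S[i] := by
  rcases Nat.lt_or_ge j i with h | h
  · exact List.Pairwise.rel_get_of_lt hs h
  · have : j = i := by omega
    subst this; exact le_refl _

-- ===== the core invariant: each greedy step keeps (successes left) = |P| - Dmax =====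
lemma sim_eq (P : List Int) : ∀ (S G : List Int), S.Pairwise (· ≤ ·) → P.length = S.length →
    (∀ p ∈ P, p ∈ G) → (∀ s ∈ S, s ∈ G) →
    sim P S = (P.length : Int) - Dmax G P S := by
  induction P with
  | nil =>
    intro S G _ _ _ _
    have h1 := Dmax_nonneg G [] S
    have h2 : Dmax G [] S ≤ 0 := by
      apply foldl_max_le _ _ _ _ le_rfl
      intro t _
      have := cntGt_nonneg S t
      simp only [fD, cntGe, List.countP_nil]
      omega
    simp only [sim, List.length_nil, Nat.cast_zero]
    omega
  | cons x P ih =>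
    intro S G hs hlen hPG hSG
    have hx : x ∈ G := hPG x List.mem_cons_self
    have hPG' : ∀ p ∈ P, p ∈ G := fun p hp => hPG p (List.mem_cons_of_mem x hp)
    cases hfi : S.findIdx? (fun v => decide (x < v)) with
    | some i =>
      obtain ⟨hi, hpi, hfirst⟩ := List.findIdx?_eq_some_iff_getElem.mp hfi
      have hxv : x < S[i] := by simpa using hpi
      have hfirst' : ∀ j (hj : j < i), S[j]'(by omega) ≤ x := by
        intro j hj
        have := hfirst j hj
        simpa using this
      have hgap : ∀ w ∈ S, x < w → S[i] ≤ w := by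
        intro w hw hxw
        obtain ⟨j, hj, rfl⟩ := List.getElem_of_mem hw
        rcases Nat.lt_or_ge j i with h | h
        · exact absurd hxw (by have := hfirst' j h; omega)
        · exact sorted_getElem_le hs h hj
      have hsub : (S.eraseIdx i).Sublist S := List.eraseIdx_sublist ..
      have hs' : (S.eraseIdx i).Pairwise (· ≤ ·) := hs.sublist hsub
      have hlen' : P.length = (S.eraseIdx i).length := by
        rw [List.length_eraseIdx_of_lt hi]
        simp only [List.length_cons] at hlen
        omega
      have hSG' : ∀ s ∈ S.eraseIdx i, s ∈ G := fun s hsm => hSG s (hsub.mem hsm)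
      -- counts around the step
      have hrel : ∀ t, fD P (S.eraseIdx i) t =
          fD (x :: P) S t - (if t ≤ x then 1 else 0) + (if t < S[i] then 1 else 0) := by
        intro t
        have h1 := cntGe_cons x P t
        have h2 := cntGt_erase S i hi t
        simp only [fD]
        omega
      have hD : Dmax G P (S.eraseIdx i) = Dmax G (x :: P) S := by
        apply le_antisymm
        · apply foldl_max_le _ _ _ _ (Dmax_nonneg ..)
          intro t ht
          have hle := le_Dmax (x :: P) S ht
          have hr := hrel t
          by_cases h1 : t ≤ x
          · have : t < S[i] := by omega
            simp [h1, this] at hr; omega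
          · by_cases h2 : t < S[i]
            · -- x < t < S[i]: use the member x and the gap
              have hGe := cntGe_step (P := x :: P) (x := x) (t := t)
                List.mem_cons_self (by omega)
              have hGt := cntGt_gap hgap (by omega) h2
              have hDx := le_Dmax (x :: P) S hx
              simp only [fD] at hDx ⊢
              simp [h1, h2] at hr
              simp only [fD] at hr
              omega
            · simp [h1, h2] at hr; omega
        · apply foldl_max_mono _ _ _ _ _ le_rfl
          intro t ht
          have hr := hrel t
          by_cases h1 : t ≤ x
          · have : t < S[i] := by omega
            simp [h1, this] at hr; omega
          · by_cases h2 : t < S[i] <;> simp [h1, h2] at hr <;> omega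
      simp only [sim, hfi]
      rw [ih (S.eraseIdx i) G hs' hlen' hPG' hSG', hD]
      simp only [List.length_cons]
      push_cast
      ring
    | none =>
      have hall : ∀ w ∈ S, ¬ x < w := by
        intro w hw
        have := List.findIdx?_eq_none_iff.mp hfi w hw
        simpa using this
      have hSne : S ≠ [] := by
        intro h; subst h; simp at hlen
      obtain ⟨m, S', rfl⟩ := List.exists_cons_of_ne_nil hSne
      have hpc := List.pairwise_cons.mp hs
      have hmin : ∀ w ∈ m :: S', m ≤ w := by
        intro w hw
        rcases List.mem_cons.mp hw with rfl | hw'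
        · exact le_refl _
        · exact hpc.1 w hw'
      have hmx : m ≤ x := le_of_not_gt (hall m List.mem_cons_self)
      have hs' : S'.Pairwise (· ≤ ·) := hpc.2
      have hlen' : P.length = S'.length := by
        simp only [List.length_cons] at hlen; omega
      have hSG' : ∀ s ∈ S', s ∈ G := fun s hsm => hSG s (List.mem_cons_of_mem m hsm)
      have herase : (m :: S').eraseIdx 0 = S' := rfl
      -- counts around the step (popped element = m, the head/min)
      have hrel : ∀ t, fD P S' t =
          fD (x :: P) (m :: S') t - (if t ≤ x then 1 else 0) + (if t < m then 1 else 0) := by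
        intro t
        have h1 := cntGe_cons x P t
        have h2 := cntGt_erase (m :: S') 0 (by simp) t
        simp only [List.getElem_cons_zero] at h2
        rw [herase] at h2
        simp only [fD]
        omega
      have hfx : 1 ≤ fD (x :: P) (m :: S') x := by
        have hzero := cntGt_zero_of_all_le hall
        have hone : 0 < (x :: P).countP (fun p => decide (x ≤ p)) :=
          List.countP_pos_iff.mpr ⟨x, List.mem_cons_self, by simp⟩
        simp only [fD, cntGe]
        omega
      have hDpos : 1 ≤ Dmax G (x :: P) (m :: S') :=
        le_trans hfx (le_Dmax _ _ hx)
      have hD : Dmax G P S' = Dmax G (x :: P) (m :: S') - 1 := by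
        apply le_antisymm
        · apply foldl_max_le _ _ _ _ (by omega)
          intro t ht
          have hr := hrel t
          by_cases h2 : t < m
          · -- everything in the pool beats t, and P has at most |S'| elements ≥ t
            have hAll := cntGt_all_of_lt_min (S := S') (fun w hw => hmin w (List.mem_cons_of_mem m hw)) h2
            have hLe := cntGe_le_length P t
            simp only [fD]
            omega
          · by_cases h1 : t ≤ x
            · have hle := le_Dmax (x :: P) (m :: S') ht
              simp [h1, h2] at hr; omega
            · -- t > x: no beaters above t, and strictly fewer P-elements ≥ t than ≥ x
              have hz1 : cntGt (m :: S') t = 0 :=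
                cntGt_zero_of_all_le (fun w hw => by have := hall w hw; omega)
              have hGe := cntGe_step (P := x :: P) (x := x) (t := t)
                List.mem_cons_self (by omega)
              have hDx := le_Dmax (x :: P) (m :: S') hx
              have hzero := cntGt_zero_of_all_le hall
              simp [h1, h2] at hr
              simp only [fD] at hr hDx ⊢
              omega
        · rcases Dmax_attained G (x :: P) (m :: S') with h0 | ⟨t, ht, hval⟩
          · have := Dmax_nonneg G P S'; omega
          · have hle := le_Dmax P S' ht
            have hr := hrel t
            split_ifs at hr <;> omega
      simp only [sim, hfi, herase]
      rw [ih S' G hs' hlen' hPG' hSG', hD]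
      simp only [List.length_cons]
      push_cast
      ring


-- ===== A's binary search = index of the first element > num =====
lemma bsLoop_term (S : List Int) (x l r index : Int) (hlr : ¬ l ≤ r)
    (hbelow : ∀ j : Nat, (j : Int) < l → ∀ (hj : j < S.length), ¬ x < S[j])
    (hdisj : (index = -1 ∧ r = (S.length : Int) - 1) ∨
      (∃ i : Nat, ∃ hi : i < S.length, index = (i : Int) ∧ x < S[i] ∧ r = (i : Int) - 1)) :
    bsLoop S x l r index =
      (match S.findIdx? (fun v => decide (x < v)) with
        | some i => (i : Int) | none => -1) := by
  rw [bsLoop, dif_neg hlr]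
  rcases hdisj with ⟨rfl, hr1⟩ | ⟨i, hi, rfl, hxi, hri⟩
  · have hnone : S.findIdx? (fun v => decide (x < v)) = none := by
      apply List.findIdx?_eq_none_iff.mpr
      intro w hw
      obtain ⟨j, hj, rfl⟩ := List.getElem_of_mem hw
      simpa using hbelow j (by omega) hj
    rw [hnone]
  · have hsome : S.findIdx? (fun v => decide (x < v)) = some i := by
      apply List.findIdx?_eq_some_iff_getElem.mpr
      refine ⟨hi, by simpa using hxi, ?_⟩
      intro j hj
      simpa using hbelow j (by omega) (by omega)
    rw [hsome]

lemma bsLoop_spec (S : List Int) (x : Int) (hs : S.Pairwise (· ≤ ·)) :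
    ∀ (n : Nat) (l r index : Int), (r - l + 1).toNat ≤ n →
    0 ≤ l → r < (S.length : Int) →
    (∀ j : Nat, (j : Int) < l → ∀ (hj : j < S.length), ¬ x < S[j]) →
    ((index = -1 ∧ r = (S.length : Int) - 1) ∨
      (∃ i : Nat, ∃ hi : i < S.length, index = (i : Int) ∧ x < S[i] ∧ r = (i : Int) - 1)) →
    bsLoop S x l r index =
      (match S.findIdx? (fun v => decide (x < v)) with
        | some i => (i : Int) | none => -1) := by
  intro n
  induction n with
  | zero =>
    intro l r index hm _ _ hbelow hdisj
    exact bsLoop_term S x l r index (by omega) hbelow hdisj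
  | succ n ihn =>
    intro l r index hm h0 hrlen hbelow hdisj
    by_cases hlr : l ≤ r
    · rw [bsLoop, dif_pos hlr]
      have hb := PySem.Int.floordiv_two_mid_bounds (lo := l) (hi := r) hlr
      set m := PySem.Int.floordiv (l + r) 2 with hmdef
      have hm0 : 0 ≤ m := by omega
      have hmlen : m < (S.length : Int) := by omega
      have htn : m.toNat < S.length := by omega
      have hget : PySem.List.pyGetD S m 0 = S[m.toNat] :=
        PySem.List.pyGetD_eq_getElem S 0 hm0 hmlen
      by_cases hcmp : PySem.List.pyGetD S m 0 > x
      · rw [if_pos hcmp]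
        have hn1 : ((m - 1) - l + 1).toNat ≤ n := by clear hdisj; omega
        have hn2 : m - 1 < (S.length : Int) := by clear hdisj; omega
        apply ihn l (m - 1) m hn1 h0 hn2 hbelow
        right
        exact ⟨m.toNat, htn, (Int.toNat_of_nonneg hm0).symm,
          by rw [hget] at hcmp; exact hcmp, by rw [Int.toNat_of_nonneg hm0]⟩
      · rw [if_neg hcmp]
        have hn1 : (r - (m + 1) + 1).toNat ≤ n := by clear hdisj; omega
        have hn2 : 0 ≤ m + 1 := by clear hdisj; omega
        apply ihn (m + 1) r index hn1 hn2 hrlen _ hdisj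
        intro j hjm hj
        rcases lt_or_ge (j : Int) l with hjl | hjl
        · exact hbelow j hjl hj
        · have hjle : j ≤ m.toNat := by omega
          have hle : S[j] ≤ S[m.toNat] := sorted_getElem_le hs hjle htn
          rw [hget] at hcmp
          omega
    · exact bsLoop_term S x l r index hlr hbelow hdisj

lemma binary_search_eq (S : List Int) (x : Int) (hs : S.Pairwise (· ≤ ·)) :
    binary_search S x =
      (match S.findIdx? (fun v => decide (x < v)) with
        | some i => (i : Int) | none => -1) := by
  unfold binary_search
  simp only [PySem.List.len_eq]
  apply bsLoop_spec S x hs S.length 0 ((S.length : Int) - 1) (-1) (by omega) le_rfl (by omega)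
  · intro j hjl _
    omega
  · left; omega

-- ===== A's main loop produces outs, and its success count is sim =====
lemma foldA : ∀ (P S ra : List Int), S.Pairwise (· ≤ ·) → P.length ≤ S.length →
    (P.foldl fmgStep (S, ra)).2 = ra ++ outs P S := by
  intro P
  induction P with
  | nil => intro S ra _ _; simp [outs]
  | cons x P ih =>
    intro S ra hs hlen
    rw [List.foldl_cons]
    have hbs := binary_search_eq S x hs
    cases hfi : S.findIdx? (fun v => decide (x < v)) with
    | some i =>
      obtain ⟨hi, _, _⟩ := List.findIdx?_eq_some_iff_getElem.mp hfi
      have hstep : fmgStep (S, ra) x = (S.eraseIdx i, ra ++ [S[i]]) := by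
        unfold fmgStep
        simp only [hbs, hfi]
        rw [if_pos (by omega : ¬ ((i : Int) = -1)), PySem.List.pop?_natCast S i hi]
      rw [hstep,
        ih (S.eraseIdx i) (ra ++ [S[i]]) (hs.sublist (List.eraseIdx_sublist ..))
          (by rw [List.length_eraseIdx_of_lt hi]; simp only [List.length_cons] at hlen; omega)]
      simp only [outs, hfi, List.getD_eq_getElem S 0 hi]
      simp
    | none =>
      have hSne : S ≠ [] := by intro h; subst h; simp at hlen
      obtain ⟨m, S', rfl⟩ := List.exists_cons_of_ne_nil hSne
      have hstep : fmgStep (m :: S', ra) x = (S', ra ++ [m]) := by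
        unfold fmgStep
        simp only [hbs, hfi]
        rw [if_neg (by simp), PySem.List.pop?_zero_cons]
      rw [hstep,
        ih S' (ra ++ [m]) (List.pairwise_cons.mp hs).2
          (by simp only [List.length_cons] at hlen; omega)]
      simp only [outs, hfi]
      simp

lemma outs_length : ∀ (P S : List Int), P.length ≤ S.length → (outs P S).length = P.length := by
  intro P
  induction P with
  | nil => intro S _; simp [outs]
  | cons x P ih =>
    intro S hlen
    cases hfi : S.findIdx? (fun v => decide (x < v)) with
    | some i =>
      obtain ⟨hi, _, _⟩ := List.findIdx?_eq_some_iff_getElem.mp hfi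
      simp only [outs, hfi, List.length_cons]
      rw [ih (S.eraseIdx i)
        (by rw [List.length_eraseIdx_of_lt hi]; simp only [List.length_cons] at hlen; omega)]
    | none =>
      have hSne : S ≠ [] := by intro h; subst h; simp at hlen
      obtain ⟨m, S', rfl⟩ := List.exists_cons_of_ne_nil hSne
      simp only [outs, hfi, List.length_cons]
      rw [show (m :: S').eraseIdx 0 = S' from rfl,
        ih S' (by simp only [List.length_cons] at hlen; omega)]

lemma count_outs : ∀ (P S : List Int), S.Pairwise (· ≤ ·) → P.length ≤ S.length →
    (((P.zip (outs P S)).countP (fun pr => decide (pr.1 < pr.2))) : Int) = sim P S := by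
  intro P
  induction P with
  | nil => intro S _ _; simp [outs, sim]
  | cons x P ih =>
    intro S hs hlen
    cases hfi : S.findIdx? (fun v => decide (x < v)) with
    | some i =>
      obtain ⟨hi, hpi, _⟩ := List.findIdx?_eq_some_iff_getElem.mp hfi
      have hxv : x < S[i] := by simpa using hpi
      have ih' := ih (S.eraseIdx i) (hs.sublist (List.eraseIdx_sublist ..))
        (by rw [List.length_eraseIdx_of_lt hi]; simp only [List.length_cons] at hlen; omega)
      simp only [outs, sim, hfi, List.getD_eq_getElem S 0 hi, List.zip_cons_cons,
        List.countP_cons]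
      rw [← ih']
      simp [hxv]
      ring
    | none =>
      have hall : ∀ w ∈ S, ¬ x < w := by
        intro w hw
        have := List.findIdx?_eq_none_iff.mp hfi w hw
        simpa using this
      have hSne : S ≠ [] := by intro h; subst h; simp at hlen
      obtain ⟨m, S', rfl⟩ := List.exists_cons_of_ne_nil hSne
      have hxm : ¬ x < m := hall m List.mem_cons_self
      have ih' := ih S' (List.pairwise_cons.mp hs).2
        (by simp only [List.length_cons] at hlen; omega)
      simp only [outs, sim, hfi, show (m :: S').eraseIdx 0 = S' from rfl,
        List.getD_cons_zero, List.zip_cons_cons, List.countP_cons]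
      rw [← ih']
      simp [hxm]

-- ===== A's final counting loop over indices = countP over the zip =====
lemma count_loop (a b : List Int) (hlen : a.length = b.length) :
    (PySem.List.pyRange 0 (PySem.List.len a) 1).foldl
      (fun cnt i =>
        if PySem.List.pyGetD a i 0 < PySem.List.pyGetD b i 0 then cnt + 1 else cnt) 0
    = (((a.zip b).countP (fun pr => decide (pr.1 < pr.2))) : Int) := by
  have hczip : (a.zip b).length = a.length := by rw [List.length_zip]; omega
  have hlena : PySem.List.len a = PySem.List.len (a.zip b) := by
    simp [hczip]
  rw [hlena]
  have hcongr : (PySem.List.pyRange 0 (PySem.List.len (a.zip b)) 1).foldl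
      (fun cnt i =>
        if PySem.List.pyGetD a i 0 < PySem.List.pyGetD b i 0 then cnt + 1 else cnt) 0
    = (PySem.List.pyRange 0 (PySem.List.len (a.zip b)) 1).foldl
      (fun cnt i =>
        (fun (acc : Int) (p : Int × Int) => if p.1 < p.2 then acc + 1 else acc) cnt
          (PySem.List.pyGetD (a.zip b) i (0, 0))) 0 := by
    apply PySem.List.foldl_congr_mem
    intro acc i hi
    have hmem := (PySem.List.mem_pyRange_one).mp hi
    have h0 : 0 ≤ i := hmem.1
    have hiz : i < ((a.zip b).length : Int) := by
      have := hmem.2; simpa using this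
    have hia : i < (a.length : Int) := by omega
    have hib : i < (b.length : Int) := by omega
    rw [PySem.List.pyGetD_eq_getElem a 0 h0 hia,
      PySem.List.pyGetD_eq_getElem b 0 h0 hib,
      PySem.List.pyGetD_eq_getElem (a.zip b) (0, 0) h0 hiz]
    simp [List.getElem_zip]
  rw [hcongr,
    PySem.List.foldl_pyRange_zero_pyGetD (a.zip b) (0, 0)
      (fun (acc : Int) (p : Int × Int) => if p.1 < p.2 then acc + 1 else acc) 0,
    PySem.List.foldl_ite_add_one]
  simp

-- ===== fD at the start is the multiplicity, so Dmax is the max multiplicity =====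
lemma fD_init (arr : List Int) (t : Int) :
    fD arr (PySem.List.sorted arr (fun x => x) false) t = (arr.count t : Int) := by
  have hperm : (PySem.List.sorted arr (fun x => x) false).Perm arr := PySem.List.sorted_perm ..
  have hGt : cntGt (PySem.List.sorted arr (fun x => x) false) t = cntGt arr t := by
    unfold cntGt; rw [hperm.countP_eq]
  have hsplit := countP_split arr (fun p => decide (t ≤ p)) (fun p => decide (t < p))
    (by intro a _ h; simp only [decide_eq_true_eq] at h ⊢; omega)
  have hsplit' : arr.countP (fun p => decide (t ≤ p)) = arr.countP (fun p => decide (t < p)) +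
      arr.countP (fun a => decide (t ≤ a) && !decide (t < a)) := hsplit
  have hcnt : arr.countP (fun a => decide (t ≤ a) && !decide (t < a)) = arr.count t := by
    rw [show (fun a : Int => decide (t ≤ a) && !decide (t < a)) = (fun a : Int => a == t) from
      funext fun a => by
        by_cases h : a = t
        · subst h; simp
        · by_cases h2 : t ≤ a
          · have h3 : t < a := by omega
            simp [h2, h3, h]
          · simp [h2, h]]
    rfl
  have hGtn : (PySem.List.sorted arr (fun x => x) false).countP (fun p => decide (t < p))
      = arr.countP (fun p => decide (t < p)) := hperm.countP_eq _
  simp only [fD, cntGe, cntGt, hGtn]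
  omega

-- ===== VERDICT (by name: the statement is the Claim_ definition above) =====
theorem findMaximumGreatness_spec : Claim_equal_findMaximumGreatness := by
  unfold Claim_equal_findMaximumGreatness
  intro arr _
  unfold Spec_findMaximumGreatness
  rcases eq_or_ne arr [] with rfl | hne
  · decide
  · set S0 := PySem.List.sorted arr (fun x => x) false with hS0
    have hs : S0.Pairwise (· ≤ ·) := by
      have := PySem.List.sorted_pairwise (xs := arr) (key := fun x => x) (κ := Int)
      simpa using this
    have hlen0 : S0.length = arr.length :=
      PySem.List.length_sorted (xs := arr) (key := fun x => x) (rev := false)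
    set G := PySem.Set.ofList arr with hG
    -- A = the success count of the greedy simulation
    have hA : findMaximumGreatness arr
        = ((arr.zip (outs arr S0)).countP (fun pr => decide (pr.1 < pr.2)) : Int) := by
      simp only [findMaximumGreatness]
      rw [← hS0, foldA arr S0 [] hs (by omega)]
      simp only [List.nil_append]
      exact count_loop arr (outs arr S0) (outs_length arr S0 (by omega)).symm
    have hsim := count_outs arr S0 hs (by omega)
    have hmain := sim_eq arr S0 G hs (by omega)
      (fun p hp => (PySem.Set.mem_ofList _ _).mpr hp)
      (fun s hsm => (PySem.Set.mem_ofList _ _).mpr ((PySem.List.mem_sorted _ _ _ _).mp hsm))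
    -- the ground set is nonempty
    obtain ⟨g, Gt, hGcons⟩ : ∃ g Gt, G = g :: Gt := by
      cases hGe : G with
      | nil =>
        exfalso
        obtain ⟨a, arr', rfl⟩ := List.exists_cons_of_ne_nil hne
        have : a ∈ G := (PySem.Set.mem_ofList _ _).mpr List.mem_cons_self
        rw [hGe] at this
        simp at this
      | cons g Gt => exact ⟨g, Gt, rfl⟩
    have hgmem : g ∈ arr := by
      have : g ∈ G := by rw [hGcons]; exact List.mem_cons_self
      exact (PySem.Set.mem_ofList _ _).mp this
    have hgpos : 0 < arr.count g := List.count_pos_iff.mpr hgmem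
    -- Dmax = max multiplicity
    have hDmax : Dmax G arr S0
        = (Gt.map (fun t => (arr.count t : Int))).foldl max ((arr.count g : Int)) := by
      unfold Dmax
      rw [show (fun (a : Int) (t : Int) => max a (fD arr S0 t))
          = (fun (a : Int) (t : Int) => max a ((arr.count t : Int))) from
        funext fun a => funext fun t => by rw [fD_init arr t]]
      rw [hGcons, List.foldl_cons, List.foldl_map,
        show max (0 : Int) ((arr.count g : Int)) = ((arr.count g : Int)) from
          max_eq_right (by positivity)]
    -- B = n - max multiplicity
    have halt : findMaximumGreatness_alt arr = (arr.length : Int)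
        - (Gt.map (fun t => (arr.count t : Int))).foldl max ((arr.count g : Int)) := by
      unfold findMaximumGreatness_alt
      rw [if_neg hne]
      simp only [PySem.Dict.foldl_insert_getD_add_one_eq_counter]
      have hvals : (PySem.Dict.counter arr).values = G.map (fun k => (arr.count k : Int)) := by
        show ((PySem.Dict.counter arr).items.map (·.2)) = _
        rw [PySem.Dict.items_counter, List.map_map]
        rfl
      rw [hvals, hGcons]
      simp only [List.map_cons]
      rw [PySem.List.max?_id_cons]
      simp [PySem.List.len_eq]
    rw [hA, hsim, hmain, hDmax, halt]
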